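-- pv_equiv track=rewrite | github.com/enjoyfrozen/vtk | Wrapping/Python/make_vtk_pyi.py | make_def
-- ===== SOURCE A (Python) =====
-- def make_def(s, indent):
--     """Generate a method definition stub from the signature and an indent.
--     The indent is a string (tabs or spaces).
--     """
--     pos = 0
--     out = ""
--     while pos < len(s) and s[pos] == '@':
--         end = s.find('\n', pos) + 1
--         if end == 0:
--             end = len(s)
--         out += indent
--         out += s[pos:end]
--         pos = end
--     if pos < len(s):
--         out += indent
--         out += "def "
--         out += s[pos:]
--         out += ": ..."
--     return out
-- ===== SOURCE B (Python) =====
-- def make_def(s, indent):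
--     """Generate a method definition stub from the signature and an indent.
--     The indent is a string (tabs or spaces).
--     """
--     if s.startswith('@'):
--         line, sep, rest = s.partition('\n')
--         return indent + line + sep + make_def(rest, indent)
--     return indent + "def " + s + ": ..." if s else ""
-- ===== Notes on version B (the rewrite author's own statement) =====
-- stated objective: simpler
-- what changed: Replaced the manual index/find scan with accumulator concatenation by a recursive decomposition: strip one leading '@' decorator line with str.partition('\n') and recurse, emitting the 'def' stub only for a nonempty remainder.
import Mathlib
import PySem

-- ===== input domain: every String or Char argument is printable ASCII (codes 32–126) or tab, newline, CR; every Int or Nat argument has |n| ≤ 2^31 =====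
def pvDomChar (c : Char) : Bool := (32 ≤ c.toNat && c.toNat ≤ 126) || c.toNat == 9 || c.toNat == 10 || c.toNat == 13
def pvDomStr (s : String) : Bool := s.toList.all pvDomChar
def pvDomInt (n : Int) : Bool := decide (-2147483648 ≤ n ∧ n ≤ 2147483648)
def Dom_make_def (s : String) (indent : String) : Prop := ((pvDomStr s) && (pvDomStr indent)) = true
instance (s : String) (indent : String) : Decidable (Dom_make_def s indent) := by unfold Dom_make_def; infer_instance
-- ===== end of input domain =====

-- B changes A's manual index scan into a recursive partition-based decomposition (objective: simpler).

-- ===== PORT A =====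
-- end = s.find('\n', pos) + 1 ; if end == 0: end = len(s)
def make_defEnd (cs : List Char) (pos : Nat) : Nat :=
  if PySem.Chars.findFrom cs ['\n'] (pos : Int) none + 1 = 0 then cs.length
  else (PySem.Chars.findFrom cs ['\n'] (pos : Int) none + 1).toNat

-- first-occurrence fact: a successful find points strictly inside the list
theorem pvFindNlLt (t : List Char) (h : PySem.Chars.find t ['\n'] ≠ -1) :
    (PySem.Chars.find t ['\n']).toNat < t.length := by
  have h0 : 0 ≤ PySem.Chars.find t ['\n'] := by
    have := PySem.Chars.neg_one_le_find t ['\n']; omega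
  have hsp := (PySem.Chars.find_spec (s := t) (sub := ['\n']) h0).1
  obtain ⟨u, hu⟩ := hsp
  by_contra hge
  have : List.drop (PySem.Chars.find t ['\n']).toNat t = [] :=
    List.drop_eq_nil_iff.mpr (by omega)
  rw [this] at hu
  simp at hu

-- termination fact for the while loop (cited by the port's decreasing_by)
theorem make_defEnd_bounds (cs : List Char) (pos : Nat) (h : pos < cs.length) :
    pos < make_defEnd cs pos ∧ make_defEnd cs pos ≤ cs.length := by
  have hspec := PySem.Chars.findFrom_natCast cs ['\n'] pos (Nat.le_of_lt h)
  have hm1 := PySem.Chars.neg_one_le_find (List.drop pos cs) ['\n']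
  have hle : PySem.Chars.find (List.drop pos cs) ['\n'] = -1 ∨
      (PySem.Chars.find (List.drop pos cs) ['\n']).toNat < (List.drop pos cs).length := by
    by_cases hf : PySem.Chars.find (List.drop pos cs) ['\n'] = -1
    · exact Or.inl hf
    · exact Or.inr (pvFindNlLt _ hf)
  have hd : (List.drop pos cs).length = cs.length - pos := List.length_drop
  unfold make_defEnd
  rw [hspec]
  split_ifs <;> omega

-- the while loop of A, state (pos, out); then the trailing if
def make_defLoop (cs indent : List Char) (pos : Nat) (out : List Char) : List Char :=
  if h : pos < cs.length ∧ PySem.List.pyGet? cs (pos : Int) = some '@' then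
    make_defLoop cs indent (make_defEnd cs pos)
      (out ++ indent ++ PySem.List.slice cs (some (pos : Int)) (some ((make_defEnd cs pos : Nat) : Int)))
  else
    if pos < cs.length then
      out ++ indent ++ "def ".toList ++ PySem.List.slice cs (some (pos : Int)) none ++ ": ...".toList
    else out
termination_by cs.length - pos
decreasing_by
  have := make_defEnd_bounds cs pos h.1
  omega

def make_def (s : String) (indent : String) : String :=
  String.ofList (make_defLoop s.toList indent.toList 0 [])

-- ===== PORT B =====
-- str.partition('\n'), ported by hand via the first occurrence of '\n'
-- (exact: CPython partition splits at the first occurrence, or returns (s, '', '') when absent)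
def pyPartitionNl (cs : List Char) : List Char × List Char × List Char :=
  if PySem.Chars.find cs ['\n'] = -1 then (cs, [], [])
  else (List.take (PySem.Chars.find cs ['\n']).toNat cs, ['\n'],
        List.drop ((PySem.Chars.find cs ['\n']).toNat + 1) cs)

-- termination fact for B's recursion (cited by the port's decreasing_by)
theorem pyPartitionNl_rest_lt (cs : List Char) (h : cs ≠ []) :
    (pyPartitionNl cs).2.2.length < cs.length := by
  have hlen : 0 < cs.length := List.length_pos_iff.mpr h
  unfold pyPartitionNl
  split_ifs with hf
  · simpa using hlen
  · have hlt := pvFindNlLt cs hf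
    have hd : (List.drop ((PySem.Chars.find cs ['\n']).toNat + 1) cs).length =
        cs.length - ((PySem.Chars.find cs ['\n']).toNat + 1) := List.length_drop
    simp only [hd]
    omega

def make_defAltGo (indent : List Char) (cs : List Char) : List Char :=
  if h : PySem.Chars.startswith cs ['@'] = true then
    indent ++ (pyPartitionNl cs).1 ++ (pyPartitionNl cs).2.1 ++
      make_defAltGo indent (pyPartitionNl cs).2.2
  else if cs ≠ [] then indent ++ "def ".toList ++ cs ++ ": ...".toList
  else []
termination_by cs.length
decreasing_by
  have hne : cs ≠ [] := by
    intro hcs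
    rw [hcs] at h
    rw [PySem.Chars.startswith_iff] at h
    simp at h
  exact pyPartitionNl_rest_lt cs hne

def make_def_alt (s : String) (indent : String) : String :=
  String.ofList (make_defAltGo indent.toList s.toList)

-- ===== PRECONDITION & SPEC =====
def Spec_make_def (s : String) (indent : String) (out : String) : Prop := out = make_def_alt s indent
instance (s : String) (indent : String) (out : String) : Decidable (Spec_make_def s indent out) := by unfold Spec_make_def; infer_instance

-- ===== CLAIM (what is proved, stated in full; the proofs are below) =====
def Claim_equal_make_def : Prop := ∀ (s : String) (indent : String), Dom_make_def s indent → Spec_make_def s indent (make_def s indent)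

-- ===== LEMMAS AND PROOFS =====

-- a singleton startswith is a head test
theorem pvStartAt (t : List Char) :
    (PySem.Chars.startswith t ['@'] = true) ↔ t[0]? = some '@' := by
  rw [PySem.Chars.startswith_iff]
  cases t with
  | nil => simp
  | cons a t => simp [List.cons_prefix_cons, eq_comm]

-- altGo on the empty remainder
theorem pvAltGoNil (indent : List Char) : make_defAltGo indent [] = [] := by
  rw [make_defAltGo]
  simp [PySem.Chars.startswith_iff]

-- the character a successful find points at is the newline
theorem pvFindNlGet (t : List Char) (h : PySem.Chars.find t ['\n'] ≠ -1) :
    t[(PySem.Chars.find t ['\n']).toNat]? = some '\n' := by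
  have h0 : 0 ≤ PySem.Chars.find t ['\n'] := by
    have := PySem.Chars.neg_one_le_find t ['\n']; omega
  have hsp := (PySem.Chars.find_spec (s := t) (sub := ['\n']) h0).1
  obtain ⟨u, hu⟩ := hsp
  have hlt := pvFindNlLt t h
  have : t[(PySem.Chars.find t ['\n']).toNat]? = (List.drop (PySem.Chars.find t ['\n']).toNat t)[0]? := by
    simp [List.getElem?_drop]
  rw [this, ← hu]
  simp

theorem loop_eq_altGo (cs indent : List Char) :
    ∀ pos out, pos ≤ cs.length →
      make_defLoop cs indent pos out = out ++ make_defAltGo indent (List.drop pos cs) := by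
  have main : ∀ n pos out, cs.length - pos ≤ n → pos ≤ cs.length →
      make_defLoop cs indent pos out = out ++ make_defAltGo indent (List.drop pos cs) := by
    intro n
    induction n with
    | zero =>
      intro pos out hn hle
      have hpos : pos = cs.length := by omega
      subst hpos
      rw [make_defLoop, dif_neg (by simp), List.drop_length, pvAltGoNil]
      simp
    | succ n ih =>
      intro pos out hn hle
      by_cases hpos : pos < cs.length
      · have hget : PySem.List.pyGet? cs (pos : Int) = cs[pos]? := PySem.List.pyGet?_natCast cs pos
        have hdg : cs[pos]? = (List.drop pos cs)[0]? := by simp [List.getElem?_drop]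
        by_cases hat : PySem.List.pyGet? cs (pos : Int) = some '@'
        · -- decorator line: one loop iteration = one altGo unfolding
          have hsw : PySem.Chars.startswith (List.drop pos cs) ['@'] = true := by
            rw [pvStartAt, ← hdg, ← hget]; exact hat
          have hspec := PySem.Chars.findFrom_natCast cs ['\n'] pos hle
          rw [make_defLoop, dif_pos ⟨hpos, hat⟩]
          rw [make_defAltGo, dif_pos hsw]
          by_cases hf : PySem.Chars.find (List.drop pos cs) ['\n'] = -1
          · -- no further newline: the whole tail is the decorator line, loop and recursion stop
            have hend : make_defEnd cs pos = cs.length := by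
              unfold make_defEnd
              rw [hspec]
              simp [hf]
            have hsl : PySem.List.slice cs (some (pos : Int)) (some ((cs.length : Nat) : Int)) =
                List.drop pos cs := by
              rw [PySem.List.slice_natCast]
              exact List.take_of_length_le (by simp)
            rw [hend, hsl, ih cs.length _ (by omega) (le_refl _)]
            simp [List.drop_length, pvAltGoNil, pyPartitionNl, hf]
          · -- newline found: emit the line with its newline, continue after it
            have h0 : 0 ≤ PySem.Chars.find (List.drop pos cs) ['\n'] := by
              have := PySem.Chars.neg_one_le_find (List.drop pos cs) ['\n']; omega
            set m : Nat := (PySem.Chars.find (List.drop pos cs) ['\n']).toNat with hm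
            have hmv : PySem.Chars.find (List.drop pos cs) ['\n'] = (m : Int) := by omega
            have hmlt : m < (List.drop pos cs).length := pvFindNlLt _ hf
            have hdl : (List.drop pos cs).length = cs.length - pos := List.length_drop
            have hend : make_defEnd cs pos = pos + m + 1 := by
              unfold make_defEnd
              rw [hspec, if_neg hf, hmv]
              have : ¬ ((pos : Int) + (m : Int) + 1 = 0) := by omega
              rw [if_neg this]
              omega
            have hsl : PySem.List.slice cs (some (pos : Int)) (some ((pos + m + 1 : Nat) : Int)) =
                List.take (m + 1) (List.drop pos cs) := by
              rw [PySem.List.slice_natCast]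
              congr 1
              omega
            have hnl : (List.drop pos cs)[m]? = some '\n' := by
              have := pvFindNlGet (List.drop pos cs) hf
              rw [← hm] at this
              exact this
            have htake : List.take (m + 1) (List.drop pos cs) =
                List.take m (List.drop pos cs) ++ ['\n'] := by
              rw [List.take_add_one, hnl]
              rfl
            have hdd : List.drop (m + 1) (List.drop pos cs) = List.drop (pos + m + 1) cs := by
              have hc : pos + (m + 1) = pos + m + 1 := by omega
              rw [List.drop_drop, hc]
            have hpart : pyPartitionNl (List.drop pos cs) =
                (List.take m (List.drop pos cs), ['\n'], List.drop (pos + m + 1) cs) := by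
              unfold pyPartitionNl
              rw [if_neg hf, hmv]
              simp [hdd]
            rw [hend, hsl, htake, ih (pos + m + 1) _ (by omega) (by omega), hpart]
            simp
        · -- no decorator: both emit the def stub for the nonempty remainder
          have hsw : ¬ (PySem.Chars.startswith (List.drop pos cs) ['@'] = true) := by
            rw [pvStartAt, ← hdg, ← hget]; exact hat
          have hne : List.drop pos cs ≠ [] := by
            intro he
            have := List.drop_eq_nil_iff.mp he
            omega
          rw [make_defLoop, dif_neg (by intro hc; exact hat hc.2), if_pos hpos]
          rw [make_defAltGo, dif_neg hsw, if_pos hne]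
          rw [PySem.List.slice_from_natCast]
          simp
      · have hpos' : pos = cs.length := by omega
        subst hpos'
        rw [make_defLoop, dif_neg (by simp), List.drop_length, pvAltGoNil]
        simp
  intro pos out hle
  exact main (cs.length - pos) pos out (le_refl _) hle

-- ===== VERDICT (by name: the statement is the Claim_ definition above) =====
theorem make_def_spec : Claim_equal_make_def := by
  intro s indent _
  unfold Spec_make_def make_def make_def_alt
  rw [loop_eq_altGo s.toList indent.toList 0 [] (Nat.zero_le _)]
  simp
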